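-- pv_equiv track=rewrite | github.com/usemanusai/jaegis-RAVERSE | src/agents/online_api_reverse_engineering_agent.py | _build_endpoint_map
-- ===== SOURCE A (Python) =====
-- from typing import Dict, Any, List, Optional
--
-- def _build_endpoint_map(endpoints: List[Dict[str, Any]]) -> Dict[str, List[str]]:
--     """Build endpoint map grouped by resource."""
--     endpoint_map = {}
--
--     for endpoint in endpoints:
--         path = endpoint["path"]
--         # Extract resource name (first path segment)
--         parts = path.strip('/').split('/')
--         resource = parts[0] if parts else "root"
--
--         if resource not in endpoint_map:
--             endpoint_map[resource] = []
--
--         endpoint_map[resource].append(f"{endpoint['method']} {path}")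
--
--     return endpoint_map
-- ===== SOURCE B (Python) =====
-- def _build_endpoint_map(endpoints):
--     """Build endpoint map grouped by resource (two-phase: tag, then group by filtering)."""
--     pairs = []
--     for endpoint in endpoints:
--         path = endpoint["path"]
--         parts = path.strip('/').split('/')
--         resource = parts[0] if parts else "root"
--         pairs.append((resource, f"{endpoint['method']} {path}"))
--     seen = list(dict.fromkeys(r for r, _ in pairs))
--     return {r: [entry for rr, entry in pairs if rr == r] for r in seen}
-- ===== Notes on version B (the rewrite author's own statement) =====
-- stated objective: alternative
-- what changed: Replaces A's single pass that mutates a dict under a membership guard by a two-phase scheme: first tag every endpoint with its (resource, 'METHOD path') pair, then dedup the resource keys in encounter order and build each group by filtering the tagged pairs per key.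
import Mathlib
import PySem

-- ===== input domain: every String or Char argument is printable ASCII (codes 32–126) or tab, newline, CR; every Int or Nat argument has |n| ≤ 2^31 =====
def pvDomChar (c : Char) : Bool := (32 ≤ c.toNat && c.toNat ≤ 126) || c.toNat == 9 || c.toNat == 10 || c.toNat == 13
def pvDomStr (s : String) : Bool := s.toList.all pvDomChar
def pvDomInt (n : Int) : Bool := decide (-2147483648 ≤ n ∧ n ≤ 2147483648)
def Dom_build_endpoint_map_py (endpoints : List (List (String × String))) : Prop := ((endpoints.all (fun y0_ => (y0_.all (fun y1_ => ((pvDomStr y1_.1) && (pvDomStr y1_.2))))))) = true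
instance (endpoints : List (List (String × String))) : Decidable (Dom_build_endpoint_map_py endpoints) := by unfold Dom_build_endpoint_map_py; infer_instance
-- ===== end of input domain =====

-- B groups by first tagging every endpoint with its (resource, "METHOD path") pair, then deduping
-- the resource keys in encounter order and filtering the tagged pairs per key — a different
-- decomposition from A's membership-guarded single pass over a mutated dict; same return value.

-- shared helpers for both ports (each line is the identical Python expression both sources contain)
-- e[k] for a dict modelled as an association list (first match); Pre_ guarantees the key is present.
def pvGetItem (e : List (String × String)) (k : String) : String :=
  ((e.find? (fun kv => kv.1 == k)).map Prod.snd).getD ""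
-- (path.strip('/').split('/')); parts[0] if parts else "root"  — split? is some since "/" ≠ ""
def pvResource (e : List (String × String)) : String :=
  let parts := (PySem.Str.split? (PySem.Str.stripChars (pvGetItem e "path") "/") "/").getD []
  parts.headD "root"
-- f"{endpoint['method']} {path}"
def pvEntry (e : List (String × String)) : String :=
  pvGetItem e "method" ++ " " ++ pvGetItem e "path"

-- ===== PORT A =====
def build_endpoint_map_py (endpoints : List (List (String × String))) : List (String × List String) :=
  endpoints.foldl (fun acc e =>
    let acc' := if acc.any (fun kv => kv.1 == pvResource e) then acc else acc ++ [(pvResource e, [])]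
    acc'.map (fun kv => if kv.1 == pvResource e then (kv.1, kv.2 ++ [pvEntry e]) else kv)) []

-- ===== PORT B =====
def build_endpoint_map_py_alt (endpoints : List (List (String × String))) : List (String × List String) :=
  let pairs := endpoints.map (fun e => (pvResource e, pvEntry e))
  let seen := PySem.List.dedup (pairs.map Prod.fst)
  seen.map (fun r => (r, (pairs.filter (fun p => p.1 == r)).map Prod.snd))

-- ===== PRECONDITION & SPEC =====
-- Pre_ excludes exactly the inputs on which Python A raises KeyError: an endpoint dict lacking "path" or "method".
def Pre_build_endpoint_map_py (endpoints : List (List (String × String))) : Prop :=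
  endpoints.all (fun e => e.any (fun kv => kv.1 == "path") && e.any (fun kv => kv.1 == "method")) = true
instance (endpoints : List (List (String × String))) : Decidable (Pre_build_endpoint_map_py endpoints) := by unfold Pre_build_endpoint_map_py; infer_instance
def pvWitness_build_endpoint_map_py : (List (List (String × String))) :=
  [[("path", "/users/1"), ("method", "GET")], [("path", "/users"), ("method", "POST")]]
def Spec_build_endpoint_map_py (endpoints : List (List (String × String))) (out : List (String × List String)) : Prop := out = build_endpoint_map_py_alt endpoints
instance (endpoints : List (List (String × String))) (out : List (String × List String)) : Decidable (Spec_build_endpoint_map_py endpoints out) := by unfold Spec_build_endpoint_map_py; infer_instance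

-- ===== CLAIM (what is proved, stated in full; the proofs are below) =====
def Claim_equal_build_endpoint_map_py : Prop := ∀ (endpoints : List (List (String × String))), Dom_build_endpoint_map_py endpoints → Pre_build_endpoint_map_py endpoints → Spec_build_endpoint_map_py endpoints (build_endpoint_map_py endpoints)

-- ===== LEMMAS AND PROOFS =====

-- the grouping B computes, over an arbitrary carrier with key and value functions
def pvGroup {α : Type} (kf vf : α → String) (es : List α) : List (String × List String) :=
  (PySem.List.dedup (es.map kf)).map (fun r => (r, (es.filter (fun e => kf e == r)).map vf))

theorem pv_dedup_append_singleton {α : Type} [BEq α] [LawfulBEq α] (xs : List α) (x : α) :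
    PySem.List.dedup (xs ++ [x]) =
      if x ∈ PySem.List.dedup xs then PySem.List.dedup xs else PySem.List.dedup xs ++ [x] := by
  simp only [PySem.List.dedup_eq_ofList, PySem.Set.ofList, List.foldl_append, List.foldl_cons,
    List.foldl_nil, PySem.Set.add, PySem.Set.contains]
  split_ifs with h1 h2 <;> simp_all

theorem pv_fold_eq_group {α : Type} (kf vf : α → String) (es : List α) :
    es.foldl (fun acc e =>
      let acc' := if acc.any (fun kv => kv.1 == kf e) then acc else acc ++ [(kf e, [])]
      acc'.map (fun kv => if kv.1 == kf e then (kv.1, kv.2 ++ [vf e]) else kv)) []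
    = pvGroup kf vf es := by
  induction es using List.reverseRecOn with
  | nil => rfl
  | append_singleton es e ih =>
    rw [List.foldl_append, List.foldl_cons, List.foldl_nil, ih]
    unfold pvGroup
    rw [List.map_append, List.map_cons, List.map_nil, pv_dedup_append_singleton]
    by_cases hmem : kf e ∈ PySem.List.dedup (List.map kf es)
    · rw [if_pos hmem]
      have hany : ((PySem.List.dedup (List.map kf es)).map
          (fun r => (r, (es.filter (fun x => kf x == r)).map vf))).any (fun kv => kv.1 == kf e) = true := by
        simp only [List.any_map, List.any_eq_true, Function.comp_def, beq_iff_eq]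
        exact ⟨kf e, hmem, rfl⟩
      simp only [hany, if_true, List.filter_append, List.filter_cons, List.filter_nil,
        List.map_append, List.map_map]
      apply List.map_congr_left
      intro r hr
      by_cases h : r = kf e
      · subst h; simp
      · simp [h, Ne.symm h]
    · rw [if_neg hmem]
      have hnin : kf e ∉ List.map kf es := fun hx => hmem (by simpa [PySem.List.mem_dedup] using hx)
      have hany : ((PySem.List.dedup (List.map kf es)).map
          (fun r => (r, (es.filter (fun x => kf x == r)).map vf))).any (fun kv => kv.1 == kf e) = false := by
        simp only [List.any_map, Function.comp_def, List.any_eq_false, beq_iff_eq]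
        intro r hr h
        exact hmem (h ▸ hr)
      have hfilt : es.filter (fun x => kf x == kf e) = [] := by
        rw [List.filter_eq_nil_iff]
        intro x hx h
        exact hnin (List.mem_map.mpr ⟨x, hx, beq_iff_eq.mp h⟩)
      simp only [hany, Bool.false_eq_true, if_false, List.filter_append, List.filter_cons,
        List.filter_nil, List.map_append, List.map_map, List.map_cons, List.map_nil]
      congr 1
      · apply List.map_congr_left
        intro r hr
        have h : r ≠ kf e := fun hh => hmem (hh ▸ hr)
        simp [h, Ne.symm h]
      · simp [hfilt]

-- ===== VERDICT (by name: the statement is the Claim_ definition above) =====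
theorem build_endpoint_map_py_spec : Claim_equal_build_endpoint_map_py := by
  intro endpoints _ _
  show build_endpoint_map_py endpoints = build_endpoint_map_py_alt endpoints
  have key := pv_fold_eq_group pvResource pvEntry endpoints
  unfold build_endpoint_map_py
  rw [key]
  unfold build_endpoint_map_py_alt pvGroup
  simp only [List.map_map, List.filter_map, Function.comp_def]
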